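-- pv_equiv track=rewrite | github.com/isasimsekk/find-majority-algorithm-compare-project | main.py | construct_best_case_quick_sort
-- ===== SOURCE A (Python) =====
-- def construct_best_case_quick_sort(sorted_arr):
--     if not sorted_arr:
--         return []
--     n = len(sorted_arr)
--     mid = n // 2
--     pivot = sorted_arr[mid]
--     left = construct_best_case_quick_sort(sorted_arr[:mid])
--     right = construct_best_case_quick_sort(sorted_arr[mid+1:])
--     return [pivot] + left + right
-- ===== SOURCE B (Python) =====
-- def construct_best_case_quick_sort(sorted_arr):
--     res = []
--     stack = [(0, len(sorted_arr))]
--     while stack: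
--         lo, hi = stack.pop()
--         if lo >= hi:
--             continue
--         mid = (lo + hi) // 2
--         res.append(sorted_arr[mid])
--         stack.append((mid + 1, hi))
--         stack.append((lo, mid))
--     return res
-- ===== Notes on version B (the rewrite author's own statement) =====
-- stated objective: faster
-- what changed: Replaces the recursive slice-and-concatenate construction with an iterative explicit-stack pre-order walk over index ranges that appends each pivot to one result list, so no sublists are ever copied.
import Mathlib
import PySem

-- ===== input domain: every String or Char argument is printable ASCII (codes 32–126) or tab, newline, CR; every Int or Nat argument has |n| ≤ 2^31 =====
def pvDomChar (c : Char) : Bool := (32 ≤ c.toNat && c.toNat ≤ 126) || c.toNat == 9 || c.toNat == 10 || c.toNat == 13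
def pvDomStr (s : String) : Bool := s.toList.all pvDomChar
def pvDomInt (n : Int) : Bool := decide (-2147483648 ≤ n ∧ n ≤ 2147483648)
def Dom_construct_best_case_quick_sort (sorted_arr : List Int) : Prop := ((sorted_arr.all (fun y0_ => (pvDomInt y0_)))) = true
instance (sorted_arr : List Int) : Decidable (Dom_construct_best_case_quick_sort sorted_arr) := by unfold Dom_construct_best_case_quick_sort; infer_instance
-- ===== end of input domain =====

-- B replaces A's recursive slice-and-concatenate construction by an iterative explicit-stack
-- pre-order walk over index ranges appending pivots to one list (faster: no sublist copying).


-- termination facts for the ports (cited by name in decreasing_by to keep the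
-- definitions' proof terms small)
theorem pvA_dec1 (xs : List Int) (h : ¬ xs = []) :
    (PySem.List.slice xs none (some (PySem.Int.floordiv (xs.length : Int) 2))).length < xs.length := by
  have hp : xs.length ≠ 0 := fun hl => h (List.eq_nil_of_length_eq_zero hl)
  rw [show PySem.Int.floordiv (xs.length : Int) 2 = ((xs.length / 2 : Nat) : Int) from by
        exact_mod_cast PySem.Int.floordiv_natCast xs.length 2,
      PySem.List.slice_to_natCast]
  simp only [List.length_take]
  omega

theorem pvA_dec2 (xs : List Int) (h : ¬ xs = []) :
    (PySem.List.slice xs (some (PySem.Int.floordiv (xs.length : Int) 2 + 1)) none).length < xs.length := by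
  have hp : xs.length ≠ 0 := fun hl => h (List.eq_nil_of_length_eq_zero hl)
  rw [show PySem.Int.floordiv (xs.length : Int) 2 + 1 = ((xs.length / 2 + 1 : Nat) : Int) from by
        rw [show PySem.Int.floordiv (xs.length : Int) 2 = ((xs.length / 2 : Nat) : Int) from by
              exact_mod_cast PySem.Int.floordiv_natCast xs.length 2]
        push_cast; ring,
      PySem.List.slice_from_natCast]
  simp only [List.length_drop]
  omega

theorem pvB_dec1 (lo hi : Nat) (st : List (Nat × Nat)) :
    2 * (st.map (fun p => p.2 - p.1)).sum + st.length <
      2 * (((lo, hi) :: st).map (fun p => p.2 - p.1)).sum + ((lo, hi) :: st).length := by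
  simp only [List.map_cons, List.sum_cons, List.length_cons]
  omega

theorem pvB_dec2 (lo hi : Nat) (st : List (Nat × Nat)) (h : ¬ lo ≥ hi) :
    2 * ((((lo, (lo + hi) / 2) :: ((lo + hi) / 2 + 1, hi) :: st).map (fun p => p.2 - p.1)).sum) +
        ((lo, (lo + hi) / 2) :: ((lo + hi) / 2 + 1, hi) :: st).length <
      2 * ((((lo, hi) :: st).map (fun p => p.2 - p.1)).sum) + ((lo, hi) :: st).length := by
  simp only [List.map_cons, List.sum_cons, List.length_cons]
  omega

-- ===== PORT A =====
-- literal transliteration of A: recursion on Python slices; mid = n//2 (written inline —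
-- it is pure, so recomputing it is the same value); the index mid is always in range
-- (1 ≤ n), so pyGetD with default 0 is exact for sorted_arr[mid].
def construct_best_case_quick_sort (sorted_arr : List Int) : List Int :=
  if _h : sorted_arr = [] then []
  else
    PySem.List.pyGetD sorted_arr (PySem.Int.floordiv (sorted_arr.length : Int) 2) 0 ::
      (construct_best_case_quick_sort
          (PySem.List.slice sorted_arr none (some (PySem.Int.floordiv (sorted_arr.length : Int) 2))) ++
       construct_best_case_quick_sort
          (PySem.List.slice sorted_arr (some (PySem.Int.floordiv (sorted_arr.length : Int) 2 + 1)) none))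
termination_by sorted_arr.length
decreasing_by
  · exact pvA_dec1 sorted_arr _h
  · exact pvA_dec2 sorted_arr _h

-- ===== PORT B =====
-- the while loop of Source B: stack of half-open index ranges, head = top of stack (Python's
-- list end); in Python's run every index is a natural with 0 ≤ lo ≤ hi ≤ len, so Nat with
-- Nat-division is exact for (lo + hi) // 2 and sorted_arr[mid] never raises (getD 0 exact).
def pvAltLoop (arr : List Int) (stack : List (Nat × Nat)) (res : List Int) : List Int :=
  match stack with
  | [] => res
  | (lo, hi) :: st =>
    if lo ≥ hi then pvAltLoop arr st res
    else
      pvAltLoop arr ((lo, (lo + hi) / 2) :: ((lo + hi) / 2 + 1, hi) :: st)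
        (res ++ [arr.getD ((lo + hi) / 2) 0])
termination_by 2 * (stack.map (fun p => p.2 - p.1)).sum + stack.length
decreasing_by
  · exact pvB_dec1 lo hi st
  · exact pvB_dec2 lo hi st (by omega)

def construct_best_case_quick_sort_alt (sorted_arr : List Int) : List Int :=
  pvAltLoop sorted_arr [(0, sorted_arr.length)] []

-- ===== PRECONDITION & SPEC =====
def Spec_construct_best_case_quick_sort (sorted_arr : List Int) (out : List Int) : Prop := out = construct_best_case_quick_sort_alt sorted_arr
instance (sorted_arr : List Int) (out : List Int) : Decidable (Spec_construct_best_case_quick_sort sorted_arr out) := by unfold Spec_construct_best_case_quick_sort; infer_instance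

-- ===== CLAIM (what is proved, stated in full; the proofs are below) =====
def Claim_equal_construct_best_case_quick_sort : Prop := ∀ (sorted_arr : List Int), Dom_construct_best_case_quick_sort sorted_arr → Spec_construct_best_case_quick_sort sorted_arr (construct_best_case_quick_sort sorted_arr)

-- ===== LEMMAS AND PROOFS =====

-- the pre-order sequence of pivots of the index range [lo, hi) of arr
def pvSeg (arr : List Int) (lo hi : Nat) : List Int :=
  if lo ≥ hi then []
  else
    arr.getD ((lo + hi) / 2) 0 ::
      (pvSeg arr lo ((lo + hi) / 2) ++ pvSeg arr ((lo + hi) / 2 + 1) hi)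
termination_by hi - lo
decreasing_by all_goals omega

theorem pvSeg_eq_nil (arr : List Int) (lo hi : Nat) (h : lo ≥ hi) : pvSeg arr lo hi = [] := by
  rw [pvSeg, if_pos h]

theorem pvSeg_eq_cons (arr : List Int) (lo hi : Nat) (h : ¬ lo ≥ hi) :
    pvSeg arr lo hi = arr.getD ((lo + hi) / 2) 0 ::
      (pvSeg arr lo ((lo + hi) / 2) ++ pvSeg arr ((lo + hi) / 2 + 1) hi) := by
  rw [pvSeg, if_neg h]

theorem pvAltLoop_spec (arr : List Int) (stack : List (Nat × Nat)) (res : List Int) :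
    pvAltLoop arr stack res = res ++ (stack.map (fun p => pvSeg arr p.1 p.2)).flatten := by
  fun_induction pvAltLoop arr stack res with
  | case1 => simp
  | case2 res lo hi st hge ih =>
    rw [ih]
    simp only [List.map_cons, List.flatten_cons, pvSeg_eq_nil arr lo hi hge]
    simp
  | case3 res lo hi st hge ih =>
    rw [ih]
    simp only [List.map_cons, List.flatten_cons, pvSeg_eq_cons arr lo hi hge]
    simp [List.append_assoc]

theorem pvA_eq_seg (arr : List Int) (k lo hi : Nat) (hk : hi - lo ≤ k) (hhi : hi ≤ arr.length) :
    construct_best_case_quick_sort ((arr.drop lo).take (hi - lo)) = pvSeg arr lo hi := by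
  induction k generalizing lo hi with
  | zero =>
    have h0 : hi - lo = 0 := by omega
    rw [h0, pvSeg, if_pos (by omega)]
    simp only [List.take_zero]
    rw [construct_best_case_quick_sort]
    simp
  | succ k ih =>
    by_cases hge : lo ≥ hi
    · have h0 : hi - lo = 0 := by omega
      rw [h0, pvSeg, if_pos hge]
      simp only [List.take_zero]
      rw [construct_best_case_quick_sort]
      simp
    · have hlen : ((arr.drop lo).take (hi - lo)).length = hi - lo := by
        simp [List.length_take, List.length_drop]; omega
      have hne : (arr.drop lo).take (hi - lo) ≠ [] := by
        intro h; rw [h] at hlen; simp at hlen; omega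
      set sub := (arr.drop lo).take (hi - lo) with hsub
      set m := (hi - lo) / 2 with hmdef
      have hmid : lo + m = (lo + hi) / 2 := by omega
      have hm : PySem.Int.floordiv (sub.length : Int) 2 = ((m : Nat) : Int) := by
        rw [hlen]; exact_mod_cast PySem.Int.floordiv_natCast (hi - lo) 2
      have hpivot : PySem.List.pyGetD sub ((m : Nat) : Int) 0 = arr.getD ((lo + hi) / 2) 0 := by
        rw [PySem.List.pyGetD_natCast, hsub]
        rw [List.getD_eq_getElem?_getD, List.getD_eq_getElem?_getD]
        rw [List.getElem?_take, List.getElem?_drop]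
        have hmlt : m < hi - lo := by omega
        simp [hmlt, hmid]
      have hleft : PySem.List.slice sub none (some ((m : Nat) : Int))
          = (arr.drop lo).take m := by
        rw [PySem.List.slice_to_natCast, hsub, List.take_take]
        congr 1
        omega
      have hright : PySem.List.slice sub (some (((m : Nat) : Int) + 1)) none
          = (arr.drop (lo + m + 1)).take (hi - lo - (m + 1)) := by
        rw [show ((m : Nat) : Int) + 1 = (((m + 1 : Nat)) : Int) from by push_cast; ring,
            PySem.List.slice_from_natCast, hsub, List.drop_take, List.drop_drop]
        congr 1
      have e1 : construct_best_case_quick_sort ((arr.drop lo).take m) = pvSeg arr lo (lo + m) := by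
        have h := ih lo (lo + m) (by omega) (by omega)
        rwa [show lo + m - lo = m from by omega] at h
      have e2 : construct_best_case_quick_sort ((arr.drop (lo + m + 1)).take (hi - lo - (m + 1)))
          = pvSeg arr (lo + m + 1) hi := by
        have h := ih (lo + m + 1) hi (by omega) hhi
        rwa [show hi - (lo + m + 1) = hi - lo - (m + 1) from by omega] at h
      rw [construct_best_case_quick_sort, dif_neg hne, hm, hpivot, hleft, hright, e1, e2]
      conv_rhs => rw [pvSeg_eq_cons arr lo hi hge]
      rw [← hmid]

-- ===== VERDICT (by name: the statement is the Claim_ definition above) =====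
theorem construct_best_case_quick_sort_spec : Claim_equal_construct_best_case_quick_sort := by
  intro arr _
  unfold Spec_construct_best_case_quick_sort construct_best_case_quick_sort_alt
  rw [pvAltLoop_spec]
  simp only [List.map_cons, List.map_nil, List.flatten, List.nil_append]
  have h := pvA_eq_seg arr arr.length 0 arr.length (by omega) (le_refl _)
  simpa using h
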